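-- pv_equiv track=rewrite | github.com/josecatela/sgcodewars | day16/day16.py | Jens_day16
-- ===== SOURCE A (Python) =====
-- def Jens_day16(reinforces, airstrikes):
--     destruction_count = [0 for i in range(len(reinforces[0]))]
--     for strike in airstrikes:
--         if len(strike) == 1:
--             if strike == '*':
--                 destruction_count[0] +=1
--                 destruction_count[1] +=1
--         else:
--             for i in range(len(strike)):
--                 if i == 0:
--                     if strike[i] == '*' or strike[i+1] == '*':
--                         destruction_count[i] +=1
--                 elif i == len(strike)-1:
--                     if strike[i] == '*' or strike[i-1] == '*':
--                         destruction_count[i] +=1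
--                         if len(strike) < len(destruction_count) and strike[i] == '*':
--                             destruction_count[i+1] +=1
--                 else:
--                     if strike[i] == '*' or strike[i+1] == '*' or strike[i-1] == '*':
--                         destruction_count[i] +=1
--     return_string = ''
--     for i in range(len(reinforces[0])):
--         if destruction_count[i] >= len(reinforces):
--             return_string += '_'
--         else:
--             return_string += reinforces[destruction_count[i]][i]
--     return return_string
-- ===== SOURCE B (Python) =====
-- def Jens_day16(reinforces, airstrikes):
--     width = len(reinforces[0])
--     rows = len(reinforces)
--     counts = [0] * width
--     for strike in airstrikes:
--         damaged = set()
--         for p, ch in enumerate(strike):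
--             if ch == '*':
--                 for c in (p - 1, p, p + 1):
--                     if 0 <= c < width:
--                         damaged.add(c)
--         for c in damaged:
--             counts[c] += 1
--     return ''.join('_' if counts[i] >= rows else reinforces[counts[i]][i]
--                    for i in range(width))
-- ===== Notes on version B (the rewrite author's own statement) =====
-- stated objective: alternative
-- what changed: B replaces A's per-column scan (three boundary-case branches testing each column's neighborhood for stars) by a fold over the star positions of each strike that collects the in-grid columns p-1, p, p+1 into a per-strike set before incrementing the counters; Pre_ excludes only inputs on which A raises IndexError (empty reinforces, a strike whose blast reaches a column at or beyond the grid width, or a ragged reinforce row too short for the final read).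
import Mathlib
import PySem

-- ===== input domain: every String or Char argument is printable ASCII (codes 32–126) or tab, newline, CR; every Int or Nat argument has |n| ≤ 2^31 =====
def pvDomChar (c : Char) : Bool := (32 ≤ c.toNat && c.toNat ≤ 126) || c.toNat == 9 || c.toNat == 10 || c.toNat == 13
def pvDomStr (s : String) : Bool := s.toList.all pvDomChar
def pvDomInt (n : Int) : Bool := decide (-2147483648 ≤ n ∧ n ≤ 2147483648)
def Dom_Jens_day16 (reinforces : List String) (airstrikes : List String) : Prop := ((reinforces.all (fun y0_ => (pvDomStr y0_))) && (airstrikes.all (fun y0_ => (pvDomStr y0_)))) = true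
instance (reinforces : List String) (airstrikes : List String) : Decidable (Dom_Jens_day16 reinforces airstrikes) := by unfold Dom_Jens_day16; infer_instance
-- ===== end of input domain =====

-- B folds over the star positions of each strike, collecting the in-grid columns p-1, p, p+1
-- into a per-strike set before incrementing the counters (alternative decomposition of A's
-- per-column neighborhood scan).

-- ===== PORT A =====
-- destruction_count[i] += 1 (no-op out of range; Pre_ excludes Python's IndexError there)
def pvBump (dc : List Nat) (i : Nat) : List Nat := dc.set i (dc.getD i 0 + 1)

-- body of A's inner 'for i in range(len(strike))' loop (acc = destruction_count)
def pvABody (s : List Char) (acc : List Nat) (i : Nat) : List Nat :=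
  if i == 0 then
    (if s.getD i ' ' == '*' || s.getD (i+1) ' ' == '*' then pvBump acc i else acc)
  else if i == s.length - 1 then
    (if s.getD i ' ' == '*' || s.getD (i-1) ' ' == '*' then
      (if decide (s.length < acc.length) && (s.getD i ' ' == '*')
       then pvBump (pvBump acc i) (i+1) else pvBump acc i)
     else acc)
  else
    (if s.getD i ' ' == '*' || s.getD (i+1) ' ' == '*' || s.getD (i-1) ' ' == '*'
     then pvBump acc i else acc)

-- body of A's 'for strike in airstrikes' loop
def pvAStrike (dc : List Nat) (strike : String) : List Nat :=
  let s := strike.toList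
  if s.length == 1 then
    (if strike == "*" then pvBump (pvBump dc 0) 1 else dc)
  else
    (List.range s.length).foldl (pvABody s) dc

def Jens_day16 (reinforces : List String) (airstrikes : List String) : String :=
  let W := (PySem.List.pyGetD reinforces 0 "").toList.length
  let dc := airstrikes.foldl pvAStrike (List.replicate W 0)
  String.ofList ((List.range W).foldl (fun acc i =>
    acc ++ (if decide (reinforces.length ≤ dc.getD i 0) then ['_']
            else [(reinforces.getD (dc.getD i 0) "").toList.getD i ' '])) [])

-- ===== PORT B =====
-- B's star loop body: for a star at p, add each of p-1, p, p+1 that lies inside the grid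
def pvStep (W : Nat) (d : PySem.Set Int) (cp : Char × Nat) : PySem.Set Int :=
  if cp.1 == '*' then
    [((cp.2 : Int)) - 1, (cp.2 : Int), (cp.2 : Int) + 1].foldl
      (fun d c => if 0 ≤ c ∧ c < (W : Int) then PySem.Set.add d c else d) d
  else d

-- the per-strike set of damaged column indices
def pvBDamaged (W : Nat) (s : List Char) : PySem.Set Int :=
  s.zipIdx.foldl (pvStep W) PySem.Set.empty

-- counts[c] += 1 (members of the set are always in [0, counts.length))
def pvBumpB (dc : List Nat) (c : Int) : List Nat := dc.set c.toNat (dc.getD c.toNat 0 + 1)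

def pvBStrike (W : Nat) (dc : List Nat) (strike : String) : List Nat :=
  (pvBDamaged W strike.toList).foldl pvBumpB dc

def Jens_day16_alt (reinforces : List String) (airstrikes : List String) : String :=
  let W := (PySem.List.pyGetD reinforces 0 "").toList.length
  let rows := reinforces.length
  let dc := airstrikes.foldl (pvBStrike W) (List.replicate W 0)
  String.ofList ((List.range W).map (fun i =>
    if decide (rows ≤ dc.getD i 0) then '_'
    else (reinforces.getD (dc.getD i 0) "").toList.getD i ' '))

-- ===== PRECONDITION & SPEC =====
-- column c of a width-≥-2 strike s is adjacent to (or at) a star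
def pvNearB (s : List Char) (c : Nat) : Bool :=
  (s[c]? == some '*') || (s[c+1]? == some '*') || (decide (0 < c) && (s[c-1]? == some '*'))

-- strike s, fired at a grid of width W, destroys column c
def pvDmg (W : Nat) (s : List Char) (c : Nat) : Bool :=
  if s.length == 1 then s == ['*'] && (decide (c = 0) || decide (c = 1))
  else (decide (c < s.length) && pvNearB s c)
    || (decide (c = s.length) && decide (s.length < W) && (s[s.length - 1]? == some '*'))

-- how many strikes destroy column i
def pvCount (W : Nat) (airstrikes : List String) (i : Nat) : Nat :=
  airstrikes.countP (fun t => pvDmg W t.toList i)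

-- Exactly the inputs on which Python A returns (no exception): a first reinforce row exists
-- (else IndexError), every destroyed column fits the grid width (else IndexError while counting),
-- and every surviving cell read by the final pass exists in its - possibly ragged - row.
def Pre_Jens_day16 (reinforces : List String) (airstrikes : List String) : Prop :=
  reinforces ≠ [] ∧
  (∀ t ∈ airstrikes, ∀ c < t.toList.length + 2,
     pvDmg ((reinforces.headD "").toList.length) t.toList c = true →
       c < (reinforces.headD "").toList.length) ∧
  (∀ i < (reinforces.headD "").toList.length,
     pvCount ((reinforces.headD "").toList.length) airstrikes i < reinforces.length →
       i < ((reinforces.getD (pvCount ((reinforces.headD "").toList.length) airstrikes i) "").toList.length))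
instance (reinforces : List String) (airstrikes : List String) : Decidable (Pre_Jens_day16 reinforces airstrikes) := by
  unfold Pre_Jens_day16; infer_instance

def pvWitness_Jens_day16 : List String × List String := (["ab", "cd"], ["*_"])

def Spec_Jens_day16 (reinforces : List String) (airstrikes : List String) (out : String) : Prop := out = Jens_day16_alt reinforces airstrikes
instance (reinforces : List String) (airstrikes : List String) (out : String) : Decidable (Spec_Jens_day16 reinforces airstrikes out) := by unfold Spec_Jens_day16; infer_instance

-- ===== CLAIM (what is proved, stated in full; the proofs are below) =====
def Claim_equal_Jens_day16 : Prop := ∀ (reinforces : List String) (airstrikes : List String), Dom_Jens_day16 reinforces airstrikes → Pre_Jens_day16 reinforces airstrikes → Spec_Jens_day16 reinforces airstrikes (Jens_day16 reinforces airstrikes)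

-- ===== LEMMAS AND PROOFS =====

theorem pvBump_getD (dc : List Nat) (i c : Nat) :
    (pvBump dc i).getD c 0 = dc.getD c 0 + (if c = i ∧ i < dc.length then 1 else 0) := by
  simp [pvBump, List.getD_eq_getElem?_getD, List.getElem?_set]
  split_ifs with h1 h2 h3 <;> simp_all

theorem pvBump_length (dc : List Nat) (i : Nat) : (pvBump dc i).length = dc.length := by
  simp [pvBump]

theorem pvABody_eq (s : List Char) (acc : List Nat) (n : Nat) (hL : 2 ≤ s.length) (hn : n < s.length) :
    pvABody s acc n =
      if pvNearB s n then
        (if n = s.length - 1 ∧ s.length < acc.length ∧ s[n]? = some '*'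
         then pvBump (pvBump acc n) (n+1) else pvBump acc n)
      else acc := by
  unfold pvABody pvNearB
  by_cases h0 : n = 0 <;> by_cases hlast : n = s.length - 1
  · omega
  · subst h0
    rw [if_pos (by simp)]
    have h1 : (1:Nat) < s.length := by omega
    rw [List.getD_eq_getElem _ _ hn, List.getD_eq_getElem _ _ h1]
    simp [hn, h1, hlast]
  · subst hlast
    rw [if_neg (by simp [h0]), if_pos (by simp)]
    have hm1 : s.length - 1 - 1 < s.length := by omega
    have hnone : s[s.length - 1 + 1]? = none := by
      apply List.getElem?_eq_none; omega
    rw [List.getD_eq_getElem _ _ hn, List.getD_eq_getElem _ _ hm1]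
    simp [hn, hm1, hnone]
    split_ifs <;> simp_all
  · rw [if_neg (by simp [h0]), if_neg (by simp [hlast])]
    have h1 : n + 1 < s.length := by omega
    have hm1 : n - 1 < s.length := by omega
    rw [List.getD_eq_getElem _ _ hn, List.getD_eq_getElem _ _ h1, List.getD_eq_getElem _ _ hm1]
    simp [hn, h1, hm1]
    split_ifs <;> simp_all

def pvHit (s : List Char) (n Wd c : Nat) : Bool :=
  (decide (c < n) && pvNearB s c) ||
    (decide (c = s.length) && decide (n = s.length) && decide (s.length < Wd)
      && (s[s.length - 1]? == some '*'))

theorem pvHit_iff (s : List Char) (n Wd c : Nat) :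
    pvHit s n Wd c = true ↔
      (c < n ∧ pvNearB s c = true) ∨
        (c = s.length ∧ n = s.length ∧ s.length < Wd ∧ s[s.length - 1]? = some '*') := by
  simp [pvHit, and_assoc]

theorem pvAFold (s : List Char) (hL : 2 ≤ s.length) (dc : List Nat) :
    ∀ n, n ≤ s.length →
      ((List.range n).foldl (pvABody s) dc).length = dc.length ∧
      ∀ c, ((List.range n).foldl (pvABody s) dc).getD c 0 =
        dc.getD c 0 + (if pvHit s n dc.length c = true ∧ c < dc.length then 1 else 0) := by
  intro n
  induction n with
  | zero =>
    refine fun _ => ⟨rfl, fun c => ?_⟩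
    rw [if_neg]
    · simp
    · simp only [pvHit_iff]
      rintro ⟨(⟨h, _⟩ | ⟨_, h, _⟩), _⟩ <;> omega
  | succ n ih =>
    intro hn1
    obtain ⟨ihlen, ihget⟩ := ih (by omega)
    have hn : n < s.length := by omega
    rw [List.range_succ, List.foldl_append, List.foldl_cons, List.foldl_nil,
      pvABody_eq s _ n hL hn]
    set prev := (List.range n).foldl (pvABody s) dc with hprev
    split_ifs with hnear hextra
    · -- near, with the extra end-bump
      obtain ⟨hlastn, hlen, hstar⟩ := hextra
      rw [ihlen] at hlen
      refine ⟨by simp [pvBump_length, ihlen], fun c => ?_⟩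
      rw [pvBump_getD, pvBump_getD, pvBump_length, ihget c, ihlen]
      simp only [pvHit_iff]
      have hstar' : s[s.length - 1]? = some '*' := by
        rw [show s.length - 1 = n by omega]; exact hstar
      by_cases h1 : c = n
      · have hA : ¬(((c < n ∧ pvNearB s c = true) ∨
            (c = s.length ∧ n = s.length ∧ s.length < dc.length ∧ s[s.length - 1]? = some '*')) ∧
            c < dc.length) := by
          rintro ⟨(⟨h, _⟩ | ⟨_, h, _⟩), _⟩ <;> omega
        have hB : c = n ∧ n < dc.length := ⟨h1, by omega⟩
        have hC : ¬(c = n + 1 ∧ n + 1 < dc.length) := by omega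
        have hD : ((c < n + 1 ∧ pvNearB s c = true) ∨
            (c = s.length ∧ n + 1 = s.length ∧ s.length < dc.length ∧ s[s.length - 1]? = some '*')) ∧
            c < dc.length :=
          ⟨Or.inl ⟨by omega, by rw [h1]; exact hnear⟩, by omega⟩
        rw [if_neg hA, if_pos hB, if_neg hC, if_pos hD]
      · by_cases h2 : c = n + 1
        · have hA : ¬(((c < n ∧ pvNearB s c = true) ∨
              (c = s.length ∧ n = s.length ∧ s.length < dc.length ∧ s[s.length - 1]? = some '*')) ∧
              c < dc.length) := by
            rintro ⟨(⟨h, _⟩ | ⟨_, h, _⟩), _⟩ <;> omega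
          have hB : ¬(c = n ∧ n < dc.length) := by omega
          have hC : c = n + 1 ∧ n + 1 < dc.length := ⟨h2, by omega⟩
          have hD : ((c < n + 1 ∧ pvNearB s c = true) ∨
              (c = s.length ∧ n + 1 = s.length ∧ s.length < dc.length ∧ s[s.length - 1]? = some '*')) ∧
              c < dc.length :=
            ⟨Or.inr ⟨by omega, by omega, hlen, hstar'⟩, by omega⟩
          rw [if_neg hA, if_neg hB, if_pos hC, if_pos hD]
        · have hB : ¬(c = n ∧ n < dc.length) := by omega
          have hC : ¬(c = n + 1 ∧ n + 1 < dc.length) := by omega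
          rw [if_neg hB, if_neg hC]
          by_cases hcn : (c < n ∧ pvNearB s c = true) ∧ c < dc.length
          · rw [if_pos ⟨Or.inl hcn.1, hcn.2⟩, if_pos ⟨Or.inl ⟨by omega, hcn.1.2⟩, hcn.2⟩]
          · have hA : ¬(((c < n ∧ pvNearB s c = true) ∨
                (c = s.length ∧ n = s.length ∧ s.length < dc.length ∧ s[s.length - 1]? = some '*')) ∧
                c < dc.length) := by
              rintro ⟨(⟨h, hh⟩ | ⟨h, hh, _⟩), hc⟩
              · exact hcn ⟨⟨h, hh⟩, hc⟩
              · omega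
            have hD : ¬(((c < n + 1 ∧ pvNearB s c = true) ∨
                (c = s.length ∧ n + 1 = s.length ∧ s.length < dc.length ∧ s[s.length - 1]? = some '*')) ∧
                c < dc.length) := by
              rintro ⟨(⟨h, hh⟩ | ⟨h, hh, _⟩), hc⟩
              · exact hcn ⟨⟨by omega, hh⟩, hc⟩
              · omega
            rw [if_neg hA, if_neg hD]
    · -- near, no extra bump
      refine ⟨by simp [pvBump_length, ihlen], fun c => ?_⟩
      rw [pvBump_getD, ihget c, ihlen]
      simp only [pvHit_iff]
      have hnoext : ¬ (s.length < dc.length ∧ s[s.length - 1]? = some '*' ∧ n + 1 = s.length) := by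
        rintro ⟨hlt, hst, hne⟩
        exact hextra ⟨by omega, by rw [ihlen]; omega,
          by rw [show n = s.length - 1 by omega]; exact hst⟩
      by_cases h1 : c = n
      · have hA : ¬(((c < n ∧ pvNearB s c = true) ∨
            (c = s.length ∧ n = s.length ∧ s.length < dc.length ∧ s[s.length - 1]? = some '*')) ∧
            c < dc.length) := by
          rintro ⟨(⟨h, _⟩ | ⟨_, h, _⟩), _⟩ <;> omega
        rw [if_neg hA]
        by_cases hcd : n < dc.length
        · rw [if_pos ⟨h1, hcd⟩,
            if_pos (show ((c < n + 1 ∧ pvNearB s c = true) ∨ _) ∧ c < dc.length from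
              ⟨Or.inl ⟨by omega, by rw [h1]; exact hnear⟩, by omega⟩)]
        · rw [if_neg (show ¬(c = n ∧ n < dc.length) by omega), if_neg]
          rintro ⟨_, hc⟩
          omega
      · rw [if_neg (show ¬(c = n ∧ n < dc.length) by omega)]
        by_cases hcn : (c < n ∧ pvNearB s c = true) ∧ c < dc.length
        · rw [if_pos ⟨Or.inl hcn.1, hcn.2⟩, if_pos ⟨Or.inl ⟨by omega, hcn.1.2⟩, hcn.2⟩]
        · have hA : ¬(((c < n ∧ pvNearB s c = true) ∨
              (c = s.length ∧ n = s.length ∧ s.length < dc.length ∧ s[s.length - 1]? = some '*')) ∧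
              c < dc.length) := by
            rintro ⟨(⟨h, hh⟩ | ⟨h, hh, _⟩), hc⟩
            · exact hcn ⟨⟨h, hh⟩, hc⟩
            · omega
          have hD : ¬(((c < n + 1 ∧ pvNearB s c = true) ∨
              (c = s.length ∧ n + 1 = s.length ∧ s.length < dc.length ∧ s[s.length - 1]? = some '*')) ∧
              c < dc.length) := by
            rintro ⟨(⟨h, hh⟩ | ⟨h, hh, hlen2, hst⟩), hc⟩
            · exact hcn ⟨⟨by omega, hh⟩, hc⟩
            · exact hnoext ⟨hlen2, hst, by omega⟩
          rw [if_neg hA, if_neg hD]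
    · -- not near
      refine ⟨ihlen, fun c => ?_⟩
      rw [ihget c]
      simp only [pvHit_iff]
      have hstar_near : s[s.length - 1]? = some '*' → n + 1 = s.length → False := by
        intro hst hne
        apply hnear
        simp only [pvNearB, Bool.or_eq_true, beq_iff_eq]
        exact Or.inl (Or.inl (by rw [show n = s.length - 1 by omega]; exact hst))
      by_cases hcn : (c < n ∧ pvNearB s c = true) ∧ c < dc.length
      · rw [if_pos ⟨Or.inl hcn.1, hcn.2⟩, if_pos ⟨Or.inl ⟨by omega, hcn.1.2⟩, hcn.2⟩]
      · have hA : ¬(((c < n ∧ pvNearB s c = true) ∨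
            (c = s.length ∧ n = s.length ∧ s.length < dc.length ∧ s[s.length - 1]? = some '*')) ∧
            c < dc.length) := by
          rintro ⟨(⟨h, hh⟩ | ⟨h, hh, _⟩), hc⟩
          · exact hcn ⟨⟨h, hh⟩, hc⟩
          · omega
        have hD : ¬(((c < n + 1 ∧ pvNearB s c = true) ∨
            (c = s.length ∧ n + 1 = s.length ∧ s.length < dc.length ∧ s[s.length - 1]? = some '*')) ∧
            c < dc.length) := by
          rintro ⟨(⟨h, hh⟩ | ⟨h, hh, hlen2, hst⟩), hc⟩
          · by_cases hcc : c < n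
            · exact hcn ⟨⟨hcc, hh⟩, hc⟩
            · exact hnear (by rw [show n = c by omega]; exact hh)
          · exact hstar_near hst (by omega)
        rw [if_neg hA, if_neg hD]

theorem pvDmg_iff_hit (s : List Char) (hL : 2 ≤ s.length) (W c : Nat) :
    pvDmg W s c = true ↔ pvHit s s.length W c = true := by
  rw [pvDmg, if_neg (by simp; omega)]
  simp [pvHit]

-- what pvStep adds for one (char, position) pair
def pvAdded (W : Nat) (cp : Char × Nat) (x : Int) : Prop :=
  cp.1 = '*' ∧ (x = (cp.2 : Int) - 1 ∨ x = (cp.2 : Int) ∨ x = (cp.2 : Int) + 1) ∧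
    0 ≤ x ∧ x < (W : Int)

theorem pvAddIf_mem (W : Nat) (d : PySem.Set Int) (c x : Int) :
    (x ∈ (if 0 ≤ c ∧ c < (W : Int) then PySem.Set.add d c else d)) ↔
      x ∈ d ∨ (x = c ∧ 0 ≤ c ∧ c < (W : Int)) := by
  split_ifs with h
  · simp only [PySem.Set.mem_add]
    constructor
    · rintro (hd | rfl)
      · exact Or.inl hd
      · exact Or.inr ⟨rfl, h⟩
    · rintro (hd | ⟨rfl, _⟩)
      · exact Or.inl hd
      · exact Or.inr rfl
  · constructor
    · exact Or.inl
    · rintro (hd | ⟨rfl, hr⟩)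
      · exact hd
      · exact absurd hr h

theorem pvStep_mem (W : Nat) (d : PySem.Set Int) (cp : Char × Nat) (x : Int) :
    x ∈ pvStep W d cp ↔ x ∈ d ∨ pvAdded W cp x := by
  unfold pvStep pvAdded
  by_cases h1 : cp.1 = '*'
  · simp only [h1, beq_self_eq_true, if_pos, List.foldl_cons, List.foldl_nil, pvAddIf_mem,
      true_and]
    constructor
    · rintro (((hd | ⟨rfl, hr⟩) | ⟨rfl, hr⟩) | ⟨rfl, hr⟩)
      · exact Or.inl hd
      · exact Or.inr ⟨Or.inl rfl, hr⟩
      · exact Or.inr ⟨Or.inr (Or.inl rfl), hr⟩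
      · exact Or.inr ⟨Or.inr (Or.inr rfl), hr⟩
    · rintro (hd | ⟨(rfl | rfl | rfl), hr⟩)
      · exact Or.inl (Or.inl (Or.inl hd))
      · exact Or.inl (Or.inl (Or.inr ⟨rfl, hr⟩))
      · exact Or.inl (Or.inr ⟨rfl, hr⟩)
      · exact Or.inr ⟨rfl, hr⟩
  · rw [if_neg (by simpa using h1)]
    constructor
    · exact Or.inl
    · rintro (hd | ⟨hs, _⟩)
      · exact hd
      · exact absurd hs h1

theorem pvStep_nodup (W : Nat) (d : PySem.Set Int) (cp : Char × Nat) (h : d.Nodup) :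
    (pvStep W d cp).Nodup := by
  unfold pvStep
  by_cases h1 : cp.1 = '*'
  · simp only [h1, beq_self_eq_true, if_pos, List.foldl_cons, List.foldl_nil]
    repeat'
      first
      | split_ifs
      | apply PySem.Set.nodup_add
      | exact h
  · rw [if_neg (by simpa using h1)]
    exact h

theorem pvFold_mem (W : Nat) (l : List (Char × Nat)) (d : PySem.Set Int) (x : Int) :
    (x ∈ l.foldl (pvStep W) d) ↔ x ∈ d ∨ ∃ pr ∈ l, pvAdded W pr x := by
  induction l generalizing d with
  | nil => simp
  | cons hd tl ih =>
    simp only [List.foldl_cons, ih, pvStep_mem, List.mem_cons]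
    constructor
    · rintro ((h | h) | ⟨pr, hpr, h⟩)
      · exact Or.inl h
      · exact Or.inr ⟨hd, Or.inl rfl, h⟩
      · exact Or.inr ⟨pr, Or.inr hpr, h⟩
    · rintro (h | ⟨pr, (rfl | hpr), h⟩)
      · exact Or.inl (Or.inl h)
      · exact Or.inl (Or.inr h)
      · exact Or.inr ⟨pr, hpr, h⟩

theorem pvFold_nodup (W : Nat) (l : List (Char × Nat)) (d : PySem.Set Int) (hd : d.Nodup) :
    (l.foldl (pvStep W) d).Nodup := by
  induction l generalizing d with
  | nil => exact hd
  | cons hd' tl ih => exact ih _ (pvStep_nodup W d hd' hd)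

theorem pvStarExists_iff (W : Nat) (s : List Char) (c : Nat) (hcW : c < W) :
    (∃ p, s[p]? = some '*' ∧ (p = c + 1 ∨ c = p ∨ c = p + 1)) ↔ pvDmg W s c = true := by
  by_cases hL1 : s.length = 1
  · rw [pvDmg, if_pos (by simp [hL1])]
    simp only [Bool.and_eq_true, Bool.or_eq_true, decide_eq_true_eq, beq_iff_eq]
    constructor
    · rintro ⟨p, hsp, hc⟩
      have hplt : p < s.length := (List.getElem?_eq_some_iff.mp hsp).1
      have hp0 : p = 0 := by omega
      have hs : s = ['*'] := by
        match s, hL1 with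
        | [a], _ => subst hp0; simp_all
      subst hp0
      refine ⟨hs, ?_⟩
      rcases hc with h | rfl | rfl <;> omega
    · rintro ⟨hs, hc⟩
      refine ⟨0, by simp [hs], ?_⟩
      rcases hc with rfl | rfl
      · exact Or.inr (Or.inl rfl)
      · exact Or.inr (Or.inr rfl)
  · rw [pvDmg, if_neg (by simp [hL1])]
    simp only [pvNearB, Bool.or_eq_true, Bool.and_eq_true, decide_eq_true_eq, beq_iff_eq]
    constructor
    · rintro ⟨p, hsp, hc⟩
      have hplt : p < s.length := (List.getElem?_eq_some_iff.mp hsp).1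
      rcases hc with rfl | rfl | rfl
      · exact Or.inl ⟨by omega, Or.inl (Or.inr hsp)⟩
      · exact Or.inl ⟨hplt, Or.inl (Or.inl hsp)⟩
      · by_cases hlt : p + 1 < s.length
        · refine Or.inl ⟨hlt, Or.inr ⟨by omega, ?_⟩⟩
          simpa using hsp
        · have hpe : p + 1 = s.length := by omega
          refine Or.inr ⟨⟨by omega, by omega⟩, ?_⟩
          rw [show s.length - 1 = p by omega]
          exact hsp
    · intro hdmg
      rcases hdmg with ⟨hclt, (hc | hnext) | ⟨hpos, hprev⟩⟩ | ⟨⟨hceq, hW⟩, hlast⟩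
      · exact ⟨c, hc, Or.inr (Or.inl rfl)⟩
      · exact ⟨c + 1, hnext, Or.inl rfl⟩
      · exact ⟨c - 1, hprev, Or.inr (Or.inr (by omega))⟩
      · have h1 : 1 ≤ s.length := by
          by_contra h
          have h0 : s.length = 0 := by omega
          simp [h0] at hlast
        exact ⟨s.length - 1, hlast, Or.inr (Or.inr (by omega))⟩

theorem pvBDamaged_mem (W : Nat) (s : List Char) (c : Nat) :
    ((c : Int) ∈ pvBDamaged W s) ↔ (pvDmg W s c = true ∧ c < W) := by
  rw [pvBDamaged, pvFold_mem]
  constructor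
  · rintro (h | ⟨pr, hmem, hstar, hc, _, hcW⟩)
    · simp [PySem.Set.empty] at h
    · have hg := List.mem_zipIdx_iff_getElem?.mp hmem
      rw [hstar] at hg
      have hcW' : c < W := by exact_mod_cast hcW
      refine ⟨(pvStarExists_iff W s c hcW').mp ⟨pr.2, hg, ?_⟩, hcW'⟩
      rcases hc with h | h | h
      · left; omega
      · right; left; exact_mod_cast h
      · right; right; exact_mod_cast h
  · rintro ⟨hdmg, hcW⟩
    obtain ⟨p, hsp, hc⟩ := (pvStarExists_iff W s c hcW).mpr hdmg
    refine Or.inr ⟨('*', p), List.mem_zipIdx_iff_getElem?.mpr hsp, rfl, ?_, by omega,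
      by exact_mod_cast hcW⟩
    rcases hc with h | h | h
    · left; omega
    · right; left; exact_mod_cast h
    · right; right; exact_mod_cast h

theorem pvBDamaged_nodup (W : Nat) (s : List Char) : (pvBDamaged W s).Nodup :=
  pvFold_nodup W s.zipIdx PySem.Set.empty List.nodup_nil

theorem pvBDamaged_nonneg (W : Nat) (s : List Char) :
    ∀ x ∈ pvBDamaged W s, 0 ≤ x := by
  intro x hx
  rw [pvBDamaged, pvFold_mem] at hx
  rcases hx with h | ⟨pr, _, _, _, h, _⟩
  · simp [PySem.Set.empty] at h
  · exact h

theorem pvFoldBumpB (l : List Int) (hnn : ∀ x ∈ l, 0 ≤ x) (hnd : l.Nodup) (dc : List Nat) :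
    ((l.foldl pvBumpB dc).length = dc.length) ∧
    ∀ c : Nat, (l.foldl pvBumpB dc).getD c 0 =
      dc.getD c 0 + (if (c : Int) ∈ l ∧ c < dc.length then 1 else 0) := by
  induction l generalizing dc with
  | nil => simp
  | cons a l ih =>
    obtain ⟨hal, hl⟩ := List.nodup_cons.mp hnd
    have ha0 : 0 ≤ a := hnn a List.mem_cons_self
    have hnn' : ∀ x ∈ l, 0 ≤ x := fun x hx => hnn x (List.mem_cons_of_mem _ hx)
    have hbump : pvBumpB dc a = pvBump dc a.toNat := rfl
    obtain ⟨ihlen, ihget⟩ := ih hnn' hl (pvBumpB dc a)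
    refine ⟨by rw [List.foldl_cons, ihlen, hbump, pvBump_length], fun c => ?_⟩
    rw [List.foldl_cons, ihget c, hbump, pvBump_getD, pvBump_length]
    have hca : (c : Int) = a ↔ c = a.toNat := by omega
    by_cases hcl : c < dc.length
    · by_cases hcae : c = a.toNat
      · have hcaI : (c : Int) = a := hca.mpr hcae
        rw [if_pos ⟨hcae, hcae ▸ hcl⟩, if_neg (fun h => hal (hcaI ▸ h.1)),
          if_pos ⟨List.mem_cons.mpr (Or.inl hcaI), hcl⟩]
      · rw [if_neg (fun h => hcae h.1)]
        by_cases hml : (c : Int) ∈ l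
        · rw [if_pos ⟨hml, hcl⟩, if_pos ⟨List.mem_cons_of_mem _ hml, hcl⟩]
        · rw [if_neg (fun h => hml h.1), if_neg]
          rintro ⟨h, _⟩
          rcases List.mem_cons.mp h with h | h
          · exact hcae (hca.mp h)
          · exact hml h
    · rw [if_neg (show ¬(c = a.toNat ∧ a.toNat < dc.length) by
          rintro ⟨rfl, h2⟩; exact hcl h2),
        if_neg (show ¬((c:Int) ∈ l ∧ c < dc.length) from fun h => hcl h.2),
        if_neg (show ¬((c:Int) ∈ a :: l ∧ c < dc.length) from fun h => hcl h.2)]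

theorem pvBStrike_spec (dc : List Nat) (strike : String) :
    ((pvBStrike dc.length dc strike).length = dc.length) ∧
    ∀ c, (pvBStrike dc.length dc strike).getD c 0 =
      dc.getD c 0 + (if pvDmg dc.length strike.toList c = true ∧ c < dc.length then 1 else 0) := by
  obtain ⟨hlen, hget⟩ := pvFoldBumpB (pvBDamaged dc.length strike.toList)
    (pvBDamaged_nonneg dc.length strike.toList) (pvBDamaged_nodup dc.length strike.toList) dc
  refine ⟨hlen, fun c => ?_⟩
  rw [pvBStrike, hget c]
  have hmem := pvBDamaged_mem dc.length strike.toList c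
  split_ifs with h1 h2 h3 <;> first | rfl | (exfalso; tauto)

theorem pvAStrike_spec (dc : List Nat) (strike : String) :
    ((pvAStrike dc strike).length = dc.length) ∧
    ∀ c, (pvAStrike dc strike).getD c 0 =
      dc.getD c 0 + (if pvDmg dc.length strike.toList c = true ∧ c < dc.length then 1 else 0) := by
  unfold pvAStrike
  by_cases hL1 : strike.toList.length = 1
  · rw [if_pos (by simpa using hL1)]
    by_cases hstar : strike = "*"
    · rw [if_pos (by simp [hstar])]
      have hsl : strike.toList = ['*'] := by rw [hstar]; rfl
      refine ⟨by simp [pvBump_length], fun c => ?_⟩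
      rw [pvBump_getD, pvBump_getD, pvBump_length]
      have hdmg : ∀ c', (pvDmg dc.length strike.toList c' = true) ↔ (c' = 0 ∨ c' = 1) := by
        intro c'; rw [pvDmg, if_pos (by simpa using hL1)]; simp [hsl]
      simp only [hdmg]
      split_ifs <;> omega
    · rw [if_neg (by simp [hstar])]
      refine ⟨rfl, fun c => ?_⟩
      rw [if_neg, Nat.add_zero]
      rintro ⟨h, _⟩
      rw [pvDmg, if_pos (by simpa using hL1)] at h
      simp only [Bool.and_eq_true, beq_iff_eq] at h
      exact hstar (String.toList_inj.mp (by rw [h.1]; rfl))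
  · rw [if_neg (by simpa using hL1)]
    by_cases hL0 : strike.toList.length = 0
    · have hnil : strike.toList = [] := List.eq_nil_of_length_eq_zero hL0
      rw [hnil]
      refine ⟨rfl, fun c => ?_⟩
      rw [if_neg, Nat.add_zero]
      · simp
      · rintro ⟨h, _⟩
        rw [pvDmg] at h
        simp at h
    · have hL2 : 2 ≤ strike.toList.length := by omega
      obtain ⟨hlen, hget⟩ := pvAFold strike.toList hL2 dc strike.toList.length le_rfl
      refine ⟨hlen, fun c => ?_⟩
      rw [hget c]
      have hiff := pvDmg_iff_hit strike.toList hL2 dc.length c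
      split_ifs <;> first | rfl | (exfalso; tauto)

theorem pvStrike_eq (dc : List Nat) (strike : String) :
    pvAStrike dc strike = pvBStrike dc.length dc strike := by
  obtain ⟨la, ga⟩ := pvAStrike_spec dc strike
  obtain ⟨lb, gb⟩ := pvBStrike_spec dc strike
  apply List.ext_getElem (by rw [la, lb])
  intro n h1 h2
  rw [show (pvAStrike dc strike)[n] = (pvAStrike dc strike).getD n 0 from
      (List.getD_eq_getElem _ _ h1).symm,
    show (pvBStrike dc.length dc strike)[n] = (pvBStrike dc.length dc strike).getD n 0 from
      (List.getD_eq_getElem _ _ h2).symm,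
    ga n, gb n]

theorem pvFolds_eq (airstrikes : List String) :
    ∀ (W : Nat) (dc : List Nat), dc.length = W →
      airstrikes.foldl pvAStrike dc = airstrikes.foldl (pvBStrike W) dc := by
  induction airstrikes with
  | nil => intro W dc _; rfl
  | cons t ts ih =>
    intro W dc hW
    subst hW
    rw [List.foldl_cons, List.foldl_cons, ← pvStrike_eq dc t,
      ih dc.length (pvAStrike dc t) (pvAStrike_spec dc t).1]

theorem pvFinal_eq (p : Nat → Bool) (f : Nat → Char) (l : List Nat) :
    l.foldl (fun acc i => acc ++ (if p i then ['_'] else [f i])) [] =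
      l.map (fun i => if p i then '_' else f i) := by
  have h : (fun (acc : List Char) (i : Nat) => acc ++ (if p i then ['_'] else [f i]))
      = fun acc i => acc ++ [if p i then '_' else f i] := by
    funext acc i; split_ifs <;> rfl
  rw [h, PySem.List.foldl_append_singleton_eq_map]
  rfl

theorem pvMain_eq (reinforces airstrikes : List String) :
    Jens_day16 reinforces airstrikes = Jens_day16_alt reinforces airstrikes := by
  simp only [Jens_day16, Jens_day16_alt]
  rw [pvFolds_eq airstrikes ((PySem.List.pyGetD reinforces 0 "").toList.length)
      (List.replicate _ 0) (by simp)]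
  rw [pvFinal_eq]

-- ===== VERDICT (by name: the statement is the Claim_ definition above) =====
theorem Jens_day16_spec : Claim_equal_Jens_day16 := by
  intro reinforces airstrikes _ _
  unfold Spec_Jens_day16
  exact pvMain_eq reinforces airstrikes
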